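-- pv_equiv track=rewrite | github.com/rabbiter-hash/everyday-solution | 0017. Letters-Number Define/python.py | separate_letters_and_numbers_test
-- ===== SOURCE A (Python) =====
-- def separate_letters_and_numbers_test(s: str) -> str:
--     if not isinstance(s, str) or not s:
--         raise ValueError('s must be a string')
--
--     # 2. 结果集
--     result = [s[0]]
--
--     # 3. 遍历
--     for i in range(1, len(s)):
--         if(s[i-1].isalpha() != s[i].isalpha()):
--             result.append("-")
--
--         result.append(s[i])
--     return "".join(result)
-- ===== SOURCE B (Python) =====
-- def separate_letters_and_numbers_test(s: str) -> str:
--     if not isinstance(s, str) or not s: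
--         raise ValueError('s must be a string')
--     # two-pointer run scan: cut s into maximal same-class runs, join with '-'
--     parts = []
--     n = len(s)
--     i = 0
--     while i < n:
--         k = s[i].isalpha()
--         j = i + 1
--         while j < n and s[j].isalpha() == k:
--             j += 1
--         parts.append(s[i:j])
--         i = j
--     return '-'.join(parts)
-- ===== Notes on version B (the rewrite author's own statement) =====
-- stated objective: alternative
-- what changed: Replaces the per-character boundary-insertion loop (append '-' whenever adjacent chars differ in isalpha) by a two-pointer scan that slices the string into maximal same-class runs and joins them with '-'.
import Mathlib
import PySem

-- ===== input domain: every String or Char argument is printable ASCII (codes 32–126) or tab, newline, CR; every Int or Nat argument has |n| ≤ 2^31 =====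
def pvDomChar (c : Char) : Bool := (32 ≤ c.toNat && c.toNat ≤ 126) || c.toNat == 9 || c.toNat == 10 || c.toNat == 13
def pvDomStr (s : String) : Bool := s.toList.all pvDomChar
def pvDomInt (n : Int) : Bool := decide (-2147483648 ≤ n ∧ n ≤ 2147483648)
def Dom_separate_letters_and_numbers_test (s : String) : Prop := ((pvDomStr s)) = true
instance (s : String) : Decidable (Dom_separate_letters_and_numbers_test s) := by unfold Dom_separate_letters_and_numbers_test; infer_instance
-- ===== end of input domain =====

-- ===== PORT A =====
-- B changes only the algorithm (runs vs per-character dashes); behaviour identical on Pre_.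
-- loop body of A: for each char, prepend '-' if the class changed vs the previous char
def goA (prev : Char) (rest : List Char) : List Char :=
  match rest with
  | [] => []
  | c :: t => (if PySem.Chars.isalpha prev != PySem.Chars.isalpha c then ['-', c] else [c]) ++ goA c t

def separate_letters_and_numbers_test (s : String) : String :=
  match s.toList with
  | [] => ""          -- unreachable under Pre_: Python A raises ValueError on ""
  | c :: t => String.ofList (c :: goA c t)

-- ===== PORT B =====
-- inner while loop of B: take the maximal prefix of class k, return (run, rest)
def takeRun (k : Bool) (cs : List Char) : List Char × List Char :=
  match cs with
  | [] => ([], [])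
  | c :: t => if PySem.Chars.isalpha c == k then
      let p := takeRun k t; (c :: p.1, p.2)
    else ([], c :: t)

theorem takeRun_rest_le (k : Bool) (cs : List Char) : (takeRun k cs).2.length ≤ cs.length := by
  induction cs with
  | nil => simp [takeRun]
  | cons c t ih =>
    simp only [takeRun]
    split
    · exact Nat.le_succ_of_le ih
    · simp

-- outer while loop of B: split into maximal same-class runs
def runsF (cs : List Char) : List (List Char) :=
  match cs with
  | [] => []
  | c :: t =>
    let p := takeRun (PySem.Chars.isalpha c) t
    (c :: p.1) :: runsF p.2
termination_by cs.length
decreasing_by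
  exact Nat.lt_succ_of_le (takeRun_rest_le _ t)

def separate_letters_and_numbers_test_alt (s : String) : String :=
  String.ofList (PySem.Chars.join ['-'] (runsF s.toList))

-- ===== PRECONDITION & SPEC =====
-- Pre_ excludes only the empty string, on which Python A (and B) raise ValueError.
def Pre_separate_letters_and_numbers_test (s : String) : Prop := s ≠ ""
instance (s : String) : Decidable (Pre_separate_letters_and_numbers_test s) := by
  unfold Pre_separate_letters_and_numbers_test; infer_instance
def pvWitness_separate_letters_and_numbers_test : String := "ab12c"

def Spec_separate_letters_and_numbers_test (s : String) (out : String) : Prop := out = separate_letters_and_numbers_test_alt s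
instance (s : String) (out : String) : Decidable (Spec_separate_letters_and_numbers_test s out) := by unfold Spec_separate_letters_and_numbers_test; infer_instance

-- ===== CLAIM =====
def Claim_equal_separate_letters_and_numbers_test : Prop := ∀ (s : String), Dom_separate_letters_and_numbers_test s → Pre_separate_letters_and_numbers_test s → Spec_separate_letters_and_numbers_test s (separate_letters_and_numbers_test s)

-- ===== LEMMAS AND PROOFS =====
theorem join_cons_head (sep : List Char) (c : Char) (X : List Char) (L : List (List Char)) :
    PySem.Chars.join sep ((c :: X) :: L) = c :: PySem.Chars.join sep (X :: L) := by
  cases L with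
  | nil => simp [PySem.Chars.join_singleton]
  | cons b L' => simp [PySem.Chars.join_cons_cons]

theorem runs_eq_goA (cs : List Char) : ∀ c : Char,
    PySem.Chars.join ['-'] (runsF (c :: cs)) = c :: goA c cs := by
  induction cs with
  | nil => intro c; rw [runsF.eq_def]; simp [takeRun, goA]; rw [runsF.eq_def]; simp [PySem.Chars.join_singleton]
  | cons d t ih =>
    intro c
    by_cases h : PySem.Chars.isalpha d = PySem.Chars.isalpha c
    · have h1 : runsF (c :: d :: t) = (c :: d :: (takeRun (PySem.Chars.isalpha c) t).1) :: runsF (takeRun (PySem.Chars.isalpha c) t).2 := by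
        rw [runsF.eq_def]; simp [takeRun, h]
      have h2 : runsF (d :: t) = (d :: (takeRun (PySem.Chars.isalpha c) t).1) :: runsF (takeRun (PySem.Chars.isalpha c) t).2 := by
        rw [runsF.eq_def]; simp [h]
      have hg : goA c (d :: t) = d :: goA d t := by
        simp [goA, h]
      rw [h1, hg, join_cons_head, ← h2, ih d]
    · have h1 : runsF (c :: d :: t) = [c] :: runsF (d :: t) := by
        rw [runsF.eq_def]
        simp only [takeRun]
        rw [if_neg (by simp [h])]
      have h2 : ∃ r rs, runsF (d :: t) = (d :: r) :: rs := by
        rw [runsF.eq_def]; exact ⟨_, _, rfl⟩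
      obtain ⟨r, rs, hr⟩ := h2
      have hg : goA c (d :: t) = '-' :: d :: goA d t := by
        simp [goA, Ne.symm h]
      rw [h1, hr, PySem.Chars.join_cons_cons, hg, ← hr, ih d]
      rfl

-- ===== VERDICT =====
theorem separate_letters_and_numbers_test_spec : Claim_equal_separate_letters_and_numbers_test := by
  intro s _ hpre
  unfold Spec_separate_letters_and_numbers_test separate_letters_and_numbers_test separate_letters_and_numbers_test_alt
  cases hcs : s.toList with
  | nil => exact absurd (by have h2 := congrArg String.ofList hcs; simpa using h2) hpre
  | cons c t => rw [runs_eq_goA]
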